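-- pv_equiv track=rewrite | github.com/EvelinaVinnikova/algos | 16_minitask.py | implementation
-- ===== SOURCE A (Python) =====
-- ordered_characters = {
--     '(': 15, ')': 16,
--     '++': 14, '--': 14,
--     '~': 13, '!': 13, 'not': 13,
--     '**': 12,
--     '*': 11, '/': 11, '//': 11, '%': 11,
--     '+': 10, '-': 10,
--     '<<': 9, '>>': 9,
--     '&': 8,
--     '^': 7,
--     '|': 6,
--     '<': 5, '<=': 5, '>': 5, '>=': 5, '!=': 5, '==': 5,
--     'is': 4, 'not is': 4, 'in': 4, 'not in': 4,
--     'and': 3,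
--     'or': 2,
--     ',': 1,
--     '1': 0, '2': 0, '3': 0, '4': 0, '5': 0,
--     '6': 0, '7': 0, '8': 0, '9': 0
-- }
--
-- def implementation(line: str)-> list:
--     '''This function takes one character from input, and creates a reverse Polish expression'''
--     line += ' '
--     result = []
--     character = ''
--     operations = []
--     for i in range(len(line)):
--         symb = line[i]
--         if symb == ' ':
--             if character == '':
--                 continue
--
--             if 0 < ordered_characters[character] < 17:
--                 if ordered_characters[character] == 15: # открывающаяся скобка
--                     result.append(character)
--                 elif ordered_characters[character] == 16: # закрывающая скобка
--                     while(1):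
--                         if operations == 0:
--                             break
--                         temp = operations.pop()
--                         if temp == '(':
--                             break
--                         result.append(temp)
--                 elif len(operations) and (ordered_characters[operations[-1]] != 15) and  (ordered_characters[operations[-1]] > ordered_characters[character]):
--                     result.append(operations.pop())
--
--                 operations.append(character)
--
--             elif ordered_characters[character] == 0:
--                 result.append(character)
--
--             character = ''
--             continue
--         else:
--             character += symb
--
--     if character:
--         result.append(character)
--     while operations:
--         result.append(operations.pop())
--     return result
-- ===== SOURCE B (Python) =====
-- ordered_characters = {
--     '(': 15, ')': 16,
--     '++': 14, '--': 14,
--     '~': 13, '!': 13, 'not': 13,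
--     '**': 12,
--     '*': 11, '/': 11, '//': 11, '%': 11,
--     '+': 10, '-': 10,
--     '<<': 9, '>>': 9,
--     '&': 8,
--     '^': 7,
--     '|': 6,
--     '<': 5, '<=': 5, '>': 5, '>=': 5, '!=': 5, '==': 5,
--     'is': 4, 'not is': 4, 'in': 4, 'not in': 4,
--     'and': 3,
--     'or': 2,
--     ',': 1,
--     '1': 0, '2': 0, '3': 0, '4': 0, '5': 0,
--     '6': 0, '7': 0, '8': 0, '9': 0
-- }
--
-- def implementation(line: str) -> list:
--     '''Token-list version: split on ' ' first, then one pass over tokens;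
--     the close-paren case moves the whole segment above the topmost '(' at once.'''
--     result = []
--     ops = []
--     for tok in line.split(' '):
--         if not tok:
--             continue
--         p = ordered_characters[tok]
--         if p == 0:
--             result.append(tok)
--         elif tok == '(':
--             result.append(tok)
--             ops.append(tok)
--         elif tok == ')':
--             k = len(ops) - 1 - ops[::-1].index('(')
--             result.extend(reversed(ops[k + 1:]))
--             ops = ops[:k]
--             ops.append(tok)
--         else:
--             if ops and ops[-1] != '(' and ordered_characters[ops[-1]] > p:
--                 result.append(ops.pop())
--             ops.append(tok)
--     result.extend(reversed(ops))
--     return result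
-- ===== Notes on version B (the rewrite author's own statement) =====
-- stated objective: alternative
-- what changed: B first splits the line into tokens (split(' ') + drop empties), replacing A's per-character accumulation pass, and handles a close paren by locating the topmost '(' and moving the whole segment above it in one slice instead of A's one-pop-at-a-time while loop.
import Mathlib
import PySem

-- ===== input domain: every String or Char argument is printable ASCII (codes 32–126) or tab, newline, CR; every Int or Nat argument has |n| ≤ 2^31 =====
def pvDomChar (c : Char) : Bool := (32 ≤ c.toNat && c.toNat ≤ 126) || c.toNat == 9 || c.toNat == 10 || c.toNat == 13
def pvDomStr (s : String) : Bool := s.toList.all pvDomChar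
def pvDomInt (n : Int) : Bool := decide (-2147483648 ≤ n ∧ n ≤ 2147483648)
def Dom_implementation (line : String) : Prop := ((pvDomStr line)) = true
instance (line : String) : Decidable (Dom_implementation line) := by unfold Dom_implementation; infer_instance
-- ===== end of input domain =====

-- B tokenizes the line first and handles the close-paren case as one slice move; same output, alternative decomposition (no speed claim).

-- shared helper: the module-level dict `ordered_characters` (lookup = first match;
-- -1 marks a missing key, which in Python is a KeyError — such inputs are outside Pre_)
def lookupTab : List (String × Int) → String → Int
  | [], _ => -1
  | (k, v) :: rest, t => if t = k then v else lookupTab rest t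

def KEYTAB : List (String × Int) :=
  [("(", 15), (")", 16), ("++", 14), ("--", 14), ("~", 13), ("!", 13), ("not", 13),
   ("**", 12), ("*", 11), ("/", 11), ("//", 11), ("%", 11), ("+", 10), ("-", 10),
   ("<<", 9), (">>", 9), ("&", 8), ("^", 7), ("|", 6),
   ("<", 5), ("<=", 5), (">", 5), (">=", 5), ("!=", 5), ("==", 5),
   ("is", 4), ("not is", 4), ("in", 4), ("not in", 4),
   ("and", 3), ("or", 2), (",", 1),
   ("1", 0), ("2", 0), ("3", 0), ("4", 0), ("5", 0), ("6", 0), ("7", 0), ("8", 0), ("9", 0)]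

def prec (t : String) : Int := lookupTab KEYTAB t

-- ===== PORT A =====

-- A's inner `while(1)` pop loop (its `operations == 0` test compares a list with the int 0 and is
-- never true; popping an empty stack is a Python IndexError, excluded by Pre_ — the [] case here
-- is that dead end).  Stacks are head-is-top (Python appends/pops at the list's end).
def popLoopA : List String → List String → List String × List String
  | [], res => (res, [])
  | t :: rest, res => if t = "(" then (res, rest) else popLoopA rest (res ++ [t])

-- the body of A's `if symb == ' '` branch for a completed nonempty token t, acting on (result, operations)
def handleTokA (t : String) (res ops : List String) : List String × List String :=
  let p := prec t
  if 0 < p ∧ p < 17 then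
    let core :=
      if p = 15 then (res ++ [t], ops)
      else if p = 16 then popLoopA ops res
      else match ops with
        | o :: rest => if ¬ prec o = 15 ∧ prec t < prec o then (res ++ [o], rest) else (res, o :: rest)
        | [] => (res, [])
    (core.1, t :: core.2)
  else if p = 0 then (res ++ [t], ops)
  else (res, ops)  -- a token not in the dict: Python raises KeyError (excluded by Pre_)

-- one character of A's for-loop; state = (result, character, operations), `character` as List Char
def stepA (st : List String × List Char × List String) (c : Char) :
    List String × List Char × List String :=
  let (res, cur, ops) := st
  if c = ' ' then
    if cur = [] then (res, [], ops)
    else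
      let r := handleTokA (String.mk cur) res ops
      (r.1, [], r.2)
  else (res, cur ++ [c], ops)

def implementation (line : String) : List String :=
  let st := (line ++ " ").toList.foldl stepA ([], [], [])
  -- trailing `if character: result.append(character)` then `while operations: result.append(operations.pop())`
  (if st.2.1 ≠ [] then st.1 ++ [String.mk st.2.1] else st.1) ++ st.2.2

-- ===== PORT B =====

-- ports `[t for t in line.split(' ') if t]`: exact — split(' ') yields the maximal space-free
-- runs plus empty pieces, and the filter drops exactly the empty ones, so the token list is
-- the maximal nonempty space-free runs, emitted here in one pass
def splitDrop (cur : List Char) : List Char → List (List Char)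
  | [] => if cur = [] then [] else [cur]
  | c :: rest =>
    if c = ' ' then (if cur = [] then splitDrop [] rest else cur :: splitDrop [] rest)
    else splitDrop (cur ++ [c]) rest

def tokensB (cs : List Char) : List (List Char) := splitDrop [] cs

-- the body of B's token loop; head-is-top stacks.  B's `k = len(ops)-1-ops[::-1].index('(')`,
-- `reversed(ops[k+1:])` and `ops[:k]` are, top-first, exactly the segment strictly above the
-- topmost '(' and the segment strictly below it (`.index` on a '('-free ops raises ValueError,
-- excluded by Pre_; the takeWhile/dropWhile pair is that dead end).
def handleTokB (t : String) (res ops : List String) : List String × List String :=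
  let p := prec t
  if p = 0 then (res ++ [t], ops)
  else if t = "(" then (res ++ [t], t :: ops)
  else if t = ")" then
    (res ++ ops.takeWhile (· ≠ "("), t :: (ops.dropWhile (· ≠ "(")).tail)
  else
    match ops with
    | o :: rest => if ¬ o = "(" ∧ prec t < prec o then (res ++ [o], t :: rest) else (res, t :: o :: rest)
    | [] => (res, [t])

def goB : List (List Char) → List String → List String → List String
  | [], res, ops => res ++ ops
  | t :: ts, res, ops =>
    let r := handleTokB (String.mk t) res ops
    goB ts r.1 r.2

def implementation_alt (line : String) : List String :=
  goB (tokensB line.toList) [] []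

-- ===== PRECONDITION & SPEC =====
-- Pre_ excludes exactly the inputs where Python A raises: a token that is not a key of
-- `ordered_characters` (KeyError), or a ')' token with no unmatched '(' before it (IndexError
-- from popping the empty stack).  A returns no value on those inputs, so nothing is claimed there.
def Pre_implementation (line : String) : Prop :=
  (∀ t ∈ tokensB line.toList, 0 ≤ prec (String.mk t)) ∧
  (∀ i, (h : i < (tokensB line.toList).length) → (tokensB line.toList)[i] = (")").toList →
      ((tokensB line.toList).take i).count (")").toList < ((tokensB line.toList).take i).count ("(").toList)

instance (line : String) : Decidable (Pre_implementation line) := by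
  unfold Pre_implementation; infer_instance

def pvWitness_implementation : String := "( 1 + 2 ) * 3"

def Spec_implementation (line : String) (out : List String) : Prop := out = implementation_alt line
instance (line : String) (out : List String) : Decidable (Spec_implementation line out) := by unfold Spec_implementation; infer_instance

-- ===== CLAIM (what is proved, stated in full; the proofs are below) =====
def Claim_equal_implementation : Prop := ∀ (line : String), Dom_implementation line → Pre_implementation line → Spec_implementation line (implementation line)

-- ===== LEMMAS AND PROOFS =====

lemma lookup_mem : ∀ (tab : List (String × Int)) (t : String),
    lookupTab tab t = -1 ∨ (t, lookupTab tab t) ∈ tab := by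
  intro tab
  induction tab with
  | nil => intro t; left; rfl
  | cons p rest ih =>
    intro t
    rcases p with ⟨k, v⟩
    by_cases h : t = k
    · right; simp [lookupTab, h]
    · rcases ih t with h' | h'
      · left; simpa [lookupTab, h] using h'
      · right; simp only [lookupTab, if_neg h]
        exact List.mem_cons_of_mem _ h'

lemma prec_eq_15_iff (t : String) : prec t = 15 ↔ t = "(" := by
  constructor
  · intro h
    rcases lookup_mem KEYTAB t with h' | h'
    · rw [prec] at h; omega
    · rw [prec] at h; rw [h] at h'
      have hall : ∀ p ∈ KEYTAB, p.2 = 15 → p.1 = "(" := by decide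
      exact hall _ h' rfl
  · intro e; subst e; decide

lemma prec_eq_16_iff (t : String) : prec t = 16 ↔ t = ")" := by
  constructor
  · intro h
    rcases lookup_mem KEYTAB t with h' | h'
    · rw [prec] at h; omega
    · rw [prec] at h; rw [h] at h'
      have hall : ∀ p ∈ KEYTAB, p.2 = 16 → p.1 = ")" := by decide
      exact hall _ h' rfl
  · intro e; subst e; decide

lemma prec_lt_17 (t : String) : prec t < 17 := by
  rcases lookup_mem KEYTAB t with h' | h'
  · rw [prec, h']; omega
  · have hall : ∀ p ∈ KEYTAB, p.2 < 17 := by decide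
    simpa [prec] using hall _ h'

lemma popLoopA_eq (ops : List String) : ∀ res,
    popLoopA ops res = (res ++ ops.takeWhile (· ≠ "("), (ops.dropWhile (· ≠ "(")).tail) := by
  induction ops with
  | nil => intro res; simp [popLoopA]
  | cons t rest ih =>
    intro res
    by_cases h : t = "("
    · simp [popLoopA, h]
    · simp [popLoopA, h, ih]

-- the two per-token steps agree on every token the dict knows
lemma handleTok_eq (t : String) (res ops : List String) (h : 0 ≤ prec t) :
    handleTokA t res ops = handleTokB t res ops := by
  have h17 := prec_lt_17 t
  by_cases h0 : prec t = 0
  · have hne : ¬ (0 < prec t ∧ prec t < 17) := by omega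
    simp [handleTokA, handleTokB, h0]
  · have hpos : 0 < prec t ∧ prec t < 17 := by omega
    by_cases h15 : prec t = 15
    · have ht : t = "(" := (prec_eq_15_iff t).mp h15
      subst ht
      simp [handleTokA, handleTokB, show prec "(" = 15 from by decide]
    · by_cases h16 : prec t = 16
      · have ht : t = ")" := (prec_eq_16_iff t).mp h16
        subst ht
        simp [handleTokA, handleTokB, popLoopA_eq, show prec ")" = 16 from by decide]
      · have ht1 : ¬ t = "(" := fun e => h15 ((prec_eq_15_iff t).mpr e)
        have ht2 : ¬ t = ")" := fun e => h16 ((prec_eq_16_iff t).mpr e)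
        simp only [handleTokA, handleTokB, if_pos hpos, if_neg h15, if_neg h16, if_neg h0,
          if_neg ht1, if_neg ht2]
        cases ops with
        | nil => simp
        | cons o rest =>
          by_cases ho : o = "("
          · subst ho
            simp [show prec "(" = 15 from by decide]
          · have h15o : ¬ prec o = 15 := fun e => ho ((prec_eq_15_iff o).mp e)
            by_cases hpo : prec t < prec o
            · simp [ho, h15o, hpo]
            · simp [ho, h15o, hpo]

def finalizeA (st : List String × List Char × List String) : List String :=
  (if st.2.1 ≠ [] then st.1 ++ [String.mk st.2.1] else st.1) ++ st.2.2

-- main invariant: running A's character loop to the end (with the appended ' ') from an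
-- accumulated partial token `cur` computes B's token loop on the tokens of the rest
lemma main_inv (cs : List Char) : ∀ (res : List String) (cur : List Char) (ops : List String),
    (∀ t ∈ splitDrop cur cs, 0 ≤ prec (String.mk t)) →
    finalizeA (List.foldl stepA (res, cur, ops) (cs ++ [' '])) = goB (splitDrop cur cs) res ops := by
  induction cs with
  | nil =>
    intro res cur ops hkeys
    by_cases hcur : cur = []
    · subst hcur
      simp [stepA, finalizeA, splitDrop, goB]
    · have hk : 0 ≤ prec (String.mk cur) := hkeys cur (by simp [splitDrop, hcur])
      simp only [List.nil_append, List.foldl_cons, List.foldl_nil, stepA,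
        if_neg hcur, splitDrop, goB]
      rw [handleTok_eq _ _ _ hk]
      simp [finalizeA, goB]
  | cons c cs' ih =>
    intro res cur ops hkeys
    by_cases hsp : c = ' '
    · subst hsp
      by_cases hcur : cur = []
      · subst hcur
        simp only [List.cons_append, List.foldl_cons, stepA]
        have hkeys' : ∀ t ∈ splitDrop [] cs', 0 ≤ prec (String.mk t) := by
          simpa [splitDrop] using hkeys
        simpa [splitDrop] using ih res [] ops hkeys'
      · have hk : 0 ≤ prec (String.mk cur) := hkeys cur (by simp [splitDrop, hcur])
        simp only [List.cons_append, List.foldl_cons, stepA, if_neg hcur]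
        rw [handleTok_eq _ _ _ hk]
        have hkeys' : ∀ t ∈ splitDrop [] cs', 0 ≤ prec (String.mk t) := by
          intro t htm
          exact hkeys t (by simp [splitDrop, hcur, htm])
        simpa [splitDrop, hcur, goB] using
          ih (handleTokB (String.mk cur) res ops).1 [] (handleTokB (String.mk cur) res ops).2 hkeys'
    · simp only [List.cons_append, List.foldl_cons, stepA, if_neg hsp]
      rw [show splitDrop cur (c :: cs') = splitDrop (cur ++ [c]) cs' from by simp [splitDrop, hsp]]
      exact ih res (cur ++ [c]) ops (by simpa [splitDrop, hsp] using hkeys)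

-- ===== VERDICT (by name: the statement is the Claim_ definition above) =====
theorem implementation_spec : Claim_equal_implementation := by
  intro line _hdom hpre
  unfold Spec_implementation implementation implementation_alt
  have h := main_inv line.toList [] [] [] (by simpa [tokensB] using hpre.1)
  simpa [finalizeA, tokensB] using h
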